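-- pv_equiv track=rewrite | github.com/yassinmoutazdev/Dataloom | sql_builder.py | _resolve_order_alias
-- ===== SOURCE A (Python) =====
-- def _resolve_order_alias(order_by: str, compiled: list, fallback: str) -> str:
--     ob_norm = order_by.lower().strip()
--     for c in compiled:
--         if c["alias"].lower() == ob_norm:
--             return c["alias"]
--     for c in compiled:
--         if ob_norm in c["alias"].lower() or c["alias"].lower() in ob_norm:
--             return c["alias"]
--     return fallback
-- ===== SOURCE B (Python) =====
-- def _resolve_order_alias(order_by: str, compiled: list, fallback: str) -> str:
--     ob_norm = order_by.lower().strip()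
--     candidate = None
--     for c in compiled:
--         al = c["alias"].lower()
--         if al == ob_norm:
--             return c["alias"]
--         if candidate is None and (ob_norm in al or al in ob_norm):
--             candidate = c["alias"]
--     return candidate if candidate is not None else fallback
-- ===== Notes on version B (the rewrite author's own statement) =====
-- stated objective: simpler
-- what changed: B merges A's two sequential scans into one pass that returns immediately on an exact alias match while remembering the first substring match in a local candidate, falling back only after the loop.
import Mathlib
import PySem

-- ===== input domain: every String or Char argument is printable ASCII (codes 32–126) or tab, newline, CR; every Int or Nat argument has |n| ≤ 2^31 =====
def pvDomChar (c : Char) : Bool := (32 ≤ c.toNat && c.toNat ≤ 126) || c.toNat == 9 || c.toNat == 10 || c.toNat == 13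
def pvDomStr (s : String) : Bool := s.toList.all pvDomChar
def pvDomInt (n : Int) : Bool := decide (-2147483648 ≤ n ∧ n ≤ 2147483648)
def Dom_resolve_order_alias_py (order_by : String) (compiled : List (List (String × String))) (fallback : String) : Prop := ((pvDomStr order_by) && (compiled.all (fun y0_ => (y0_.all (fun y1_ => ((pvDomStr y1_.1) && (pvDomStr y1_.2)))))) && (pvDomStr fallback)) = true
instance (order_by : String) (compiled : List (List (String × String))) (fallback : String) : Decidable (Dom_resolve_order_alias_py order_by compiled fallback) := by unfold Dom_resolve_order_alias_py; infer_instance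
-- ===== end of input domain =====

-- ===== PORT A =====
-- Header: B resolves ORDER BY in one pass (exact match returns immediately, first substring
-- match is remembered as a candidate) instead of A's two sequential scans; objective: simpler.
-- c["alias"]: first-match lookup in the assoc list; "" default is never reached under Pre_.
def aliasOf (c : List (String × String)) : String := (PySem.Dict.mk c).getD "alias" ""

def resolve_order_alias_py (order_by : String) (compiled : List (List (String × String))) (fallback : String) : String :=
  let ob_norm := PySem.Str.strip (PySem.Str.lower order_by)
  match compiled.find? (fun c => PySem.Str.lower (aliasOf c) == ob_norm) with
  | some c => aliasOf c
  | none =>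
    match compiled.find? (fun c => PySem.Str.isIn ob_norm (PySem.Str.lower (aliasOf c)) || PySem.Str.isIn (PySem.Str.lower (aliasOf c)) ob_norm) with
    | some c => aliasOf c
    | none => fallback

-- ===== PORT B =====
-- one pass: return on exact match, remember first substring match in `candidate`
def altGo (ob_norm : String) (candidate : Option String) (compiled : List (List (String × String))) (fallback : String) : String :=
  match compiled with
  | [] => candidate.getD fallback
  | c :: rest =>
    let al := PySem.Str.lower (aliasOf c)
    if al == ob_norm then aliasOf c
    else altGo ob_norm
      (if candidate.isNone && (PySem.Str.isIn ob_norm al || PySem.Str.isIn al ob_norm) then some (aliasOf c) else candidate)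
      rest fallback

def resolve_order_alias_py_alt (order_by : String) (compiled : List (List (String × String))) (fallback : String) : String :=
  altGo (PySem.Str.strip (PySem.Str.lower order_by)) none compiled fallback

-- ===== PRECONDITION & SPEC =====
-- Pre_ excludes exactly the inputs where Python A raises KeyError: an entry without an "alias"
-- key that A actually reads, i.e. one not preceded by an exact (lowered/stripped) alias match.
def Pre_resolve_order_alias_py (order_by : String) (compiled : List (List (String × String))) (fallback : String) : Prop :=
  ∀ i : Fin compiled.length, (PySem.Dict.mk compiled[i]).contains "alias" = false →
    ∃ j : Fin compiled.length, j < i ∧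
      (PySem.Dict.mk compiled[j]).contains "alias" = true ∧
      PySem.Str.lower (aliasOf compiled[j]) = PySem.Str.strip (PySem.Str.lower order_by)
instance (order_by : String) (compiled : List (List (String × String))) (fallback : String) : Decidable (Pre_resolve_order_alias_py order_by compiled fallback) := by unfold Pre_resolve_order_alias_py; infer_instance
def pvWitness_resolve_order_alias_py : String × (List (List (String × String))) × String :=
  ("Name", [[("alias", "name")], [("alias", "fullname")]], "id")

def Spec_resolve_order_alias_py (order_by : String) (compiled : List (List (String × String))) (fallback : String) (out : String) : Prop := out = resolve_order_alias_py_alt order_by compiled fallback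
instance (order_by : String) (compiled : List (List (String × String))) (fallback : String) (out : String) : Decidable (Spec_resolve_order_alias_py order_by compiled fallback out) := by unfold Spec_resolve_order_alias_py; infer_instance

-- ===== CLAIM (what is proved, stated in full; the proofs are below) =====
def Claim_equal_resolve_order_alias_py : Prop := ∀ (order_by : String) (compiled : List (List (String × String))) (fallback : String), Dom_resolve_order_alias_py order_by compiled fallback → Pre_resolve_order_alias_py order_by compiled fallback → Spec_resolve_order_alias_py order_by compiled fallback (resolve_order_alias_py order_by compiled fallback)

-- ===== LEMMAS AND PROOFS =====

-- ===== VERDICT (by name: the statement is the Claim_ definition above) =====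
-- loop invariant for B's single pass, relating it to A's two scans
theorem altGo_eq (ob : String) (fb : String) (l : List (List (String × String))) :
    ∀ (cand : Option String),
    altGo ob cand l fb =
      match l.find? (fun c => PySem.Str.lower (aliasOf c) == ob) with
      | some c => aliasOf c
      | none =>
        match cand with
        | some a => a
        | none =>
          match l.find? (fun c => PySem.Str.isIn ob (PySem.Str.lower (aliasOf c)) || PySem.Str.isIn (PySem.Str.lower (aliasOf c)) ob) with
          | some c => aliasOf c
          | none => fb := by
  induction l with
  | nil => intro cand; cases cand <;> simp [altGo]
  | cons c rest ih =>
    intro cand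
    simp only [altGo, List.find?_cons]
    by_cases hx : PySem.Str.lower (aliasOf c) == ob
    · simp [hx]
    · rw [if_neg (by simpa using hx)]
      rw [ih]
      simp only [hx, Bool.false_eq_true, if_false]
      cases rest.find? (fun c => PySem.Str.lower (aliasOf c) == ob) with
      | some c' => cases cand <;> simp
      | none =>
        cases cand with
        | some a => simp
        | none =>
          by_cases hs : (PySem.Str.isIn ob (PySem.Str.lower (aliasOf c)) || PySem.Str.isIn (PySem.Str.lower (aliasOf c)) ob) = true
          · simp only [hs]; simp
          · simp only [Bool.not_eq_true] at hs; simp only [hs]; simp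

theorem resolve_order_alias_py_spec : Claim_equal_resolve_order_alias_py := by
  intro order_by compiled fallback _ _
  unfold Spec_resolve_order_alias_py resolve_order_alias_py resolve_order_alias_py_alt
  rw [altGo_eq]
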